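-- pv_equiv track=rewrite | github.com/fannarl/traveler | dæmatímaverk/dæmatími_sets/sets3.py | get_word_list
-- ===== SOURCE A (Python) =====
-- import string
--
-- str_punct = string.punctuation
--
-- def get_word_list(fpointer):
--     word_string = ""
--     for line in fpointer:
--         word_string += line
--         word_string = word_string.lower()
--     word_string = word_string.split()
--     word_string = [i.strip(str_punct) for i in word_string]
--     return word_string
-- ===== SOURCE B (Python) =====
-- # B: single char-level scan building the word list directly (token accumulator across
-- # lines), instead of A's concatenate-then-split-then-strip multi-pass. Alternative
-- # decomposition; exact same return value.
-- import string
--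
-- str_punct = string.punctuation
--
--
-- def get_word_list(fpointer):
--     words = []
--     token = []
--     for line in fpointer:
--         for ch in line:
--             c = ch.lower()
--             if c.isspace():
--                 if token:
--                     words.append("".join(token).strip(str_punct))
--                     token = []
--             else:
--                 token.append(c)
--     if token:
--         words.append("".join(token).strip(str_punct))
--     return words
-- ===== Notes on version B (the rewrite author's own statement) =====
-- stated objective: faster
-- what changed: B replaces A's concatenate-everything / re-lowercase-the-whole-accumulated-string-per-line / whole-text split() / strip comprehension with a single character-level scan that lowercases each character, splits on whitespace and emits punctuation-stripped words as it goes (token carried across line boundaries, so words spanning lines behave exactly as in A).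
import Mathlib
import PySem

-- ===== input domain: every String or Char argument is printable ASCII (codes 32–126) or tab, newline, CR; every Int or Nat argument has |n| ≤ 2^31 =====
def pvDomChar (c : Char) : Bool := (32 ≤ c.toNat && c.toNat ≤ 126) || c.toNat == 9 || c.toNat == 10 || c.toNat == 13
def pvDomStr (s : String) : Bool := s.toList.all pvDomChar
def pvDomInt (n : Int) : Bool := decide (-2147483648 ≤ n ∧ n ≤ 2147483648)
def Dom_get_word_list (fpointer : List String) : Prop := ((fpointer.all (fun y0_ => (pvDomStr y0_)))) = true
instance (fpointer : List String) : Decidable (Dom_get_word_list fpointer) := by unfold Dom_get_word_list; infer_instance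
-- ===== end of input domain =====

-- B is an alternative decomposition: one character-level scan that lowercases, splits on
-- whitespace and strips punctuation as it goes, instead of A's concatenate / re-lowercase /
-- whole-text split / strip-comprehension passes. Same return value on every input.

-- string.punctuation
def pvPunct : List Char := "!\"#$%&'()*+,-./:;<=>?@[\\]^_`{|}~".toList

-- ===== PORT A =====
def get_word_list (fpointer : List String) : List String :=
  let word_string : List Char :=
    fpointer.foldl (fun acc line => PySem.Chars.lower (acc ++ line.toList)) []
  (PySem.Chars.split₀ word_string).map (fun i => String.ofList (PySem.Chars.stripChars i pvPunct))

-- ===== PORT B =====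
-- flush: append the joined, punctuation-stripped token (if nonempty) to the word list
def pvFlush (st : List Char × List (List Char)) : List (List Char) :=
  if st.1.isEmpty then st.2 else st.2 ++ [PySem.Chars.stripChars st.1 pvPunct]

-- per-character step of B's scan: lowercase, split on whitespace, else extend the token
def pvStep (st : List Char × List (List Char)) (ch : Char) : List Char × List (List Char) :=
  let c := PySem.Chars.lowerChar ch
  if PySem.Chars.isspace c then ([], pvFlush st) else (st.1 ++ [c], st.2)

def get_word_list_alt (fpointer : List String) : List String :=
  let st := fpointer.foldl (fun st line => line.toList.foldl pvStep st) ([], [])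
  (pvFlush st).map String.ofList

-- ===== PRECONDITION & SPEC =====
def Spec_get_word_list (fpointer : List String) (out : List String) : Prop := out = get_word_list_alt fpointer
instance (fpointer : List String) (out : List String) : Decidable (Spec_get_word_list fpointer out) := by unfold Spec_get_word_list; infer_instance

-- ===== CLAIM (what is proved, stated in full; the proofs are below) =====
def Claim_equal_get_word_list : Prop := ∀ (fpointer : List String), Dom_get_word_list fpointer → Spec_get_word_list fpointer (get_word_list fpointer)

-- ===== LEMMAS AND PROOFS =====

theorem pv_lowerChar_idem (c : Char) :
    PySem.Chars.lowerChar (PySem.Chars.lowerChar c) = PySem.Chars.lowerChar c := by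
  unfold PySem.Chars.lowerChar PySem.Chars.isupper
  split_ifs with h1 h2
  · exfalso
    simp only [Bool.and_eq_true, decide_eq_true_eq, Char.le_def, UInt32.le_iff_toNat_le,
      Char.toNat_val] at h1 h2
    have hA : ('A').toNat = 65 := rfl
    have hZ : ('Z').toNat = 90 := rfl
    have hval : Nat.isValidChar (c.toNat + 32) := by left; omega
    rw [Char.toNat_ofNat (c.toNat + 32), if_pos hval] at h2
    omega
  · rfl
  · rfl

theorem pv_lower_lower (s : List Char) :
    PySem.Chars.lower (PySem.Chars.lower s) = PySem.Chars.lower s := by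
  simp only [PySem.Chars.lower, List.map_map]
  exact List.map_congr_left (fun c _ => pv_lowerChar_idem c)

theorem pv_lower_append (s t : List Char) :
    PySem.Chars.lower (s ++ t) = PySem.Chars.lower s ++ PySem.Chars.lower t := by
  simp [PySem.Chars.lower]

-- A's accumulation loop computes the lowercase of the whole concatenation
theorem pv_foldA (lines : List String) : ∀ acc : List Char,
    lines.foldl (fun a l => PySem.Chars.lower (a ++ l.toList)) (PySem.Chars.lower acc)
      = PySem.Chars.lower (acc ++ (lines.map String.toList).flatten) := by
  induction lines with
  | nil => intro acc; simp
  | cons l ls ih =>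
    intro acc
    have h1 : PySem.Chars.lower (PySem.Chars.lower acc ++ l.toList)
        = PySem.Chars.lower (acc ++ l.toList) := by
      rw [pv_lower_append, pv_lower_append, pv_lower_lower]
    simp only [List.foldl_cons, h1]
    rw [ih (acc ++ l.toList)]
    simp

-- split₀.go distributes over its accumulator
theorem pv_go_acc : ∀ (cs cur : List Char) (acc : List (List Char)),
    PySem.Chars.split₀.go cs cur acc = acc.reverse ++ PySem.Chars.split₀.go cs cur [] := by
  intro cs
  induction cs with
  | nil =>
    intro cur acc
    simp only [PySem.Chars.split₀.go]
    by_cases h : cur.isEmpty <;> simp [h]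
  | cons c rest ih =>
    intro cur acc
    simp only [PySem.Chars.split₀.go]
    by_cases hs : PySem.Chars.isspace c
    · by_cases hc : cur.isEmpty
      · simp only [hs, hc, if_true]
        exact ih [] acc
      · simp only [hs, hc, if_true]
        rw [ih [] (cur.reverse :: acc), ih [] [cur.reverse]]
        simp
    · simp only [hs]
      exact ih (c :: cur) acc

-- B's scan over cs equals A's split-then-strip of the lowercased cs
theorem pv_scan_go : ∀ (cs token : List Char) (words : List (List Char)),
    pvFlush (cs.foldl pvStep (token, words))
      = words ++ (PySem.Chars.split₀.go (PySem.Chars.lower cs) token.reverse []).map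
          (fun w => PySem.Chars.stripChars w pvPunct) := by
  intro cs
  induction cs with
  | nil =>
    intro token words
    simp only [List.foldl_nil, PySem.Chars.lower, List.map_nil, PySem.Chars.split₀.go]
    by_cases h : token.isEmpty
    · simp [pvFlush, List.isEmpty_iff.mp h]
    · have : token.reverse.isEmpty = false := by
        simp only [List.isEmpty_eq_false_iff] at h ⊢; simpa using h
      simp [pvFlush, h, this]
  | cons c rest ih =>
    intro token words
    have hl : PySem.Chars.lower (c :: rest)
        = PySem.Chars.lowerChar c :: PySem.Chars.lower rest := rfl
    rw [hl]
    simp only [List.foldl_cons, PySem.Chars.split₀.go]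
    by_cases hs : PySem.Chars.isspace (PySem.Chars.lowerChar c)
    · by_cases ht : token.isEmpty
      · have htr : token.reverse.isEmpty = true := by
          simp only [List.isEmpty_iff] at ht ⊢; simp [ht]
        have htok : token = [] := List.isEmpty_iff.mp ht
        simp only [hs, htr, if_true]
        have hstep : pvStep (token, words) c = ([], words) := by
          simp [pvStep, hs, pvFlush, ht]
        rw [hstep]
        simpa using ih [] words
      · have htr : token.reverse.isEmpty = false := by
          simp only [List.isEmpty_eq_false_iff] at ht ⊢; simpa using ht
        simp only [hs, htr, if_true, List.reverse_reverse]
        have hstep : pvStep (token, words) c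
            = ([], words ++ [PySem.Chars.stripChars token pvPunct]) := by
          simp [pvStep, hs, pvFlush, ht]
        rw [hstep, pv_go_acc _ [] [token]]
        rw [ih [] (words ++ [PySem.Chars.stripChars token pvPunct])]
        simp
    · simp only [hs]
      have hstep : pvStep (token, words) c
          = (token ++ [PySem.Chars.lowerChar c], words) := by
        simp [pvStep, hs]
      rw [hstep, ih (token ++ [PySem.Chars.lowerChar c]) words]
      simp

-- ===== VERDICT (by name: the statement is the Claim_ definition above) =====
theorem get_word_list_spec : Claim_equal_get_word_list := by
  intro fpointer _
  unfold Spec_get_word_list get_word_list get_word_list_alt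
  -- flatten B's per-line fold into one fold over all characters
  have hB : fpointer.foldl (fun st line => line.toList.foldl pvStep st) (([] : List Char), ([] : List (List Char)))
      = ((fpointer.map String.toList).flatten).foldl pvStep ([], []) := by
    rw [List.foldl_flatten, List.foldl_map]
  -- A's accumulation loop is the lowercase of the concatenation
  have hA : fpointer.foldl (fun acc line => PySem.Chars.lower (acc ++ line.toList)) []
      = PySem.Chars.lower ((fpointer.map String.toList).flatten) := by
    have := pv_foldA fpointer []
    simpa using this
  simp only [hA, hB]
  rw [pv_scan_go ((fpointer.map String.toList).flatten) [] []]
  simp [PySem.Chars.split₀, List.map_map]
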